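-- pv_equiv track=rewrite | github.com/BlueberryOreo/2021Python | 考试/11-23模拟考/gold.py | func6
-- ===== SOURCE A (Python) =====
-- def func6(m,n):
--     if m<=0 or n<=0:
--         return None
--     if m<100:
--         return m
--     temp=[int(i) for i in str(m)]
--     temp[0] = (temp[0]+n)%10
--     res=int(''.join(list(map(str, temp))))
--     return res
-- ===== SOURCE B (Python) =====
-- def func6(m, n):
--     if m <= 0 or n <= 0:
--         return None
--     if m < 100:
--         return m
--     p = 10 ** (len(str(m)) - 1)
--     first = m // p
--     return m - (first - (first + n) % 10) * p
-- ===== Notes on version B (the rewrite author's own statement) =====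
-- stated objective: simpler
-- what changed: replaces A's digit-list build, first-element replacement, string re-join and re-parse by direct place-value arithmetic: p = 10**(len(str(m))-1), first = m//p, result = m - (first - (first+n)%10)*p
import Mathlib
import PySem

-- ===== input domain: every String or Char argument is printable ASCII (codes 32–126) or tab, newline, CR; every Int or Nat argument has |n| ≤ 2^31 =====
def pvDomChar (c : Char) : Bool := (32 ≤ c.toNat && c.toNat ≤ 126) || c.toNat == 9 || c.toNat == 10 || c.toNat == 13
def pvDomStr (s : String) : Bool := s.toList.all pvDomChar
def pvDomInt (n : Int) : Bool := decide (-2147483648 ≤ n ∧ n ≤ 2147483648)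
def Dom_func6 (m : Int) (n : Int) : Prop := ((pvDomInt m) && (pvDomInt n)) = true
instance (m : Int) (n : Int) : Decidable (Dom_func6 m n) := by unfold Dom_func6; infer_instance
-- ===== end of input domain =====

-- B replaces A's digit-list build / replace / re-join / re-parse by direct place-value
-- arithmetic on the leading digit (objective: simpler). Return values are identical.

-- ===== PORT A =====
def func6 (m : Int) (n : Int) : Option Int :=
  if m ≤ 0 ∨ n ≤ 0 then none
  else if m < 100 then some m
  else
    -- temp = [int(i) for i in str(m)]  (each i is a digit char of a positive int, so int(i) never raises; the getD default is unreachable)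
    let temp : List Int := (PySem.Int.toStr m).toList.map (fun i => (PySem.Int.ofChars? [i]).getD 0)
    -- temp[0] = (temp[0] + n) % 10
    let temp2 : List Int := PySem.List.pySetD temp 0 (PySem.Int.mod (PySem.List.pyGetD temp 0 0 + n) 10)
    -- res = int(''.join(list(map(str, temp))))  (a nonempty all-digit string, so int() never raises; the getD default is unreachable)
    let res : Int := (PySem.Int.ofStr? (PySem.Str.join "" (temp2.map PySem.Int.toStr))).getD 0
    some res

-- ===== PORT B =====
def func6_alt (m : Int) (n : Int) : Option Int :=
  if m ≤ 0 ∨ n ≤ 0 then none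
  else if m < 100 then some m
  else
    -- p = 10 ** (len(str(m)) - 1)  (the exponent is ≥ 0 because str(m) is nonempty, so toNat is exact)
    let p : Int := 10 ^ (PySem.Str.len (PySem.Int.toStr m) - 1).toNat
    let first : Int := PySem.Int.floordiv m p
    some (m - (first - PySem.Int.mod (first + n) 10) * p)

-- ===== PRECONDITION & SPEC =====
def Spec_func6 (m : Int) (n : Int) (out : Option Int) : Prop := out = func6_alt m n
instance (m : Int) (n : Int) (out : Option Int) : Decidable (Spec_func6 m n out) := by unfold Spec_func6; infer_instance

-- ===== CLAIM (what is proved, stated in full; the proofs are below) =====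
def Claim_equal_func6 : Prop := ∀ (m : Int) (n : Int), Dom_func6 m n → Spec_func6 m n (func6 m n)

-- ===== LEMMAS AND PROOFS =====

-- ---- a public clone of PySem's private digit parser loop, and a bridge to it ----

def pvGo : List Char → Bool → Nat → Option Nat
  | [], afterDigit, acc => if afterDigit = true then some acc else none
  | c :: rest, afterDigit, acc =>
      if c.isDigit = true then pvGo rest true (acc * 10 + (c.toNat - '0'.toNat))
      else
        if c = '_' ∧ afterDigit = true then
          match rest with
          | d :: _ => if d.isDigit = true then pvGo rest false acc else none
          | [] => none
        else none

def pvDigitsVal? (x : List Char) : Option Nat :=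
  match x with
  | [] => none
  | cs => pvGo cs false 0

theorem pvGoExt (G : List Char → Bool → Nat → Option Nat)
    (h0 : ∀ b a, G [] b a = if b = true then some a else none)
    (h1 : ∀ c rest b a, G (c :: rest) b a =
      if c.isDigit = true then G rest true (a * 10 + (c.toNat - '0'.toNat))
      else
        if c = '_' ∧ b = true then
          match rest with
          | d :: _ => if d.isDigit = true then G rest false a else none
          | [] => none
        else none) :
    ∀ ds b a, G ds b a = pvGo ds b a := by
  intro ds
  induction ds with
  | nil => intro b a; rw [h0]; rfl
  | cons c t ih =>
      intro b a
      rw [h1]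
      simp only [pvGo]
      split_ifs with hd hu
      · exact ih _ _
      · rcases t with _ | ⟨d, t2⟩
        · rfl
        · simp only [ih]
      · rfl

theorem pvDvExt (D : List Char → Option Nat) (G : List Char → Bool → Nat → Option Nat)
    (hnil : D [] = none)
    (hcons : ∀ x, D x = (match x with | [] => (none : Option Nat) | cs => G cs false 0))
    (h0 : ∀ b a, G [] b a = if b = true then some a else none)
    (h1 : ∀ c rest b a, G (c :: rest) b a =
      if c.isDigit = true then G rest true (a * 10 + (c.toNat - '0'.toNat))
      else
        if c = '_' ∧ b = true then
          match rest with
          | d :: _ => if d.isDigit = true then G rest false a else none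
          | [] => none
        else none) :
    ∀ x, D x = pvDigitsVal? x := by
  intro x
  cases x with
  | nil => rw [hnil]; rfl
  | cons c cs => rw [hcons (c :: cs)]; simp only []; rw [pvGoExt G h0 h1]; rfl

theorem pvAbsBridge (D : List Char → Option Nat) (G : List Char → Bool → Nat → Option Nat)
    (hnil : D [] = none)
    (hcons : ∀ x, D x = (match x with | [] => (none : Option Nat) | cs => G cs false 0))
    (h0 : ∀ b a, G [] b a = if b = true then some a else none)
    (h1 : ∀ c rest b a, G (c :: rest) b a =
      if c.isDigit = true then G rest true (a * 10 + (c.toNat - '0'.toNat))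
      else
        if c = '_' ∧ b = true then
          match rest with
          | d :: _ => if d.isDigit = true then G rest false a else none
          | [] => none
        else none) (x : List Char) :
    Option.map (fun n => n) ((D x).bind fun a => pure ((a : Nat) : Int)) =
    Option.map (fun n => n) ((pvDigitsVal? x).bind fun a => pure ((a : Nat) : Int)) := by
  rw [pvDvExt D G hnil hcons h0 h1 x]

theorem pv_digit_not_space (c : Char) (h : c.isDigit = true) :
    PySem.Int.isIntSpace c = false := by
  simp only [PySem.Int.isIntSpace]
  by_contra hc
  simp only [Bool.not_eq_false, Bool.or_eq_true, decide_eq_true_eq] at hc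
  rcases hc with ((((hc|hc)|hc)|hc)|hc)|hc <;> subst hc <;> simp at h

-- ofChars? on a nonempty all-digit list computes the parser clone
set_option maxHeartbeats 1000000 in
theorem pv_parse_aux (c : Char) (t : List Char)
    (h : ∀ x ∈ c :: t, x.isDigit = true) :
    PySem.Int.ofChars? (c :: t) = (pvGo (c :: t) false 0).map (fun n => (n : Int)) := by
  have hds : ∀ x ∈ c :: t, PySem.Int.isIntSpace x = false := fun x hx => pv_digit_not_space x (h x hx)
  have h1 : List.dropWhile PySem.Int.isIntSpace (c :: t) = c :: t := by
    rw [List.dropWhile_cons_of_neg]; simp [hds c (by simp)]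
  have h2 : List.dropWhile PySem.Int.isIntSpace ((c :: t).reverse) = (c :: t).reverse := by
    apply List.dropWhile_eq_self_iff.mpr
    intro hh
    simp only [List.getElem_reverse, Bool.not_eq_true]
    exact hds _ (List.getElem_mem _)
  simp only [PySem.Int.ofChars?, h1, h2, List.reverse_reverse]
  have hcm : c ≠ '-' := fun e => by subst e; simpa using h '-' (by simp)
  have hcp : c ≠ '+' := fun e => by subst e; simpa using h '+' (by simp)
  split
  next cs2 ds2 heq => rw [List.cons.injEq] at heq; exact absurd heq.1 hcm
  next cs2 ds2 heq => rw [List.cons.injEq] at heq; exact absurd heq.1 hcp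
  next =>
    exact pvAbsBridge _ _ rfl (fun x => by with_unfolding_all rfl)
      (fun b a => by with_unfolding_all rfl)
      (fun c' rest b a => by with_unfolding_all rfl) (c :: t)

-- ---- the value of a digit string ----

def pvVal (ds : List Char) (a : Nat) : Nat :=
  ds.foldl (fun x c => x * 10 + (c.toNat - '0'.toNat)) a

theorem pvVal_nil (a : Nat) : pvVal [] a = a := by simp [pvVal]

theorem pvVal_cons (c : Char) (t : List Char) (a : Nat) :
    pvVal (c :: t) a = pvVal t (a * 10 + (c.toNat - '0'.toNat)) := by simp [pvVal]

theorem pv_digit_bounds (c : Char) (h : c.isDigit = true) : 48 ≤ c.toNat ∧ c.toNat ≤ 57 := by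
  simp [Char.isDigit] at h; exact h

theorem pv_zero_toNat : '0'.toNat = 48 := rfl

theorem pvVal_append_singleton (ds : List Char) (c : Char) (a : Nat) :
    pvVal (ds ++ [c]) a = pvVal ds a * 10 + (c.toNat - '0'.toNat) := by
  simp [pvVal, List.foldl_append]

theorem pvGo_digits (ds : List Char) (h : ∀ x ∈ ds, x.isDigit = true)
    (hne : ds ≠ []) (b : Bool) (a : Nat) : pvGo ds b a = some (pvVal ds a) := by
  induction ds generalizing b a with
  | nil => exact absurd rfl hne
  | cons c t ih =>
      have hc : c.isDigit = true := h c (by simp)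
      rcases t with _ | ⟨d, t2⟩
      · simp [pvGo, hc, pvVal]
      · rw [pvVal_cons]
        conv_lhs => rw [pvGo]
        rw [if_pos hc]
        exact ih (fun x hx => h x (List.mem_cons_of_mem _ hx)) (by simp) true _

theorem pv_parse (ds : List Char) (h : ∀ x ∈ ds, x.isDigit = true) (hne : ds ≠ []) :
    PySem.Int.ofChars? ds = some ((pvVal ds 0 : Nat) : Int) := by
  rcases List.exists_cons_of_ne_nil hne with ⟨c, t, rfl⟩
  rw [pv_parse_aux c t h, pvGo_digits (c :: t) h hne false 0]
  rfl

theorem pvVal_shift (ds : List Char) (a : Nat) :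
    pvVal ds a = a * 10 ^ ds.length + pvVal ds 0 := by
  induction ds generalizing a with
  | nil => simp [pvVal]
  | cons c t ih =>
      rw [pvVal_cons, ih]
      conv_rhs => rw [pvVal_cons, ih]
      simp [List.length_cons, pow_succ]
      ring

theorem pvVal_lt (ds : List Char) (h : ∀ x ∈ ds, x.isDigit = true) :
    pvVal ds 0 < 10 ^ ds.length := by
  induction ds with
  | nil => simp [pvVal]
  | cons c t ih =>
      have hc : c.isDigit = true := h c (by simp)
      have hc9 : c.toNat - '0'.toNat ≤ 9 := by
        have := pv_digit_bounds c hc; have := pv_zero_toNat; omega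
      rw [pvVal_cons, pvVal_shift]
      have ht := ih (fun x hx => h x (by simp [hx]))
      calc (0 * 10 + (c.toNat - '0'.toNat)) * 10 ^ t.length + pvVal t 0
          < (0 * 10 + (c.toNat - '0'.toNat)) * 10 ^ t.length + 10 ^ t.length := by omega
        _ ≤ 10 * 10 ^ t.length := by
            have : (0 * 10 + (c.toNat - '0'.toNat)) + 1 ≤ 10 := by omega
            calc (0 * 10 + (c.toNat - '0'.toNat)) * 10 ^ t.length + 10 ^ t.length
                = ((0 * 10 + (c.toNat - '0'.toNat)) + 1) * 10 ^ t.length := by ring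
              _ ≤ 10 * 10 ^ t.length := Nat.mul_le_mul_right _ this
        _ = 10 ^ (c :: t).length := by rw [List.length_cons]; ring

-- ---- facts about Nat.toDigits 10 ----

theorem pv_digitChar_isDigit (k : Nat) (h : k < 10) : (Nat.digitChar k).isDigit = true := by
  interval_cases k <;> decide

theorem pv_digitChar_toNat (k : Nat) (h : k < 10) : (Nat.digitChar k).toNat - '0'.toNat = k := by
  interval_cases k <;> decide

theorem pv_digitChar_toNat' (k : Nat) (h : k < 10) : (Nat.digitChar k).toNat = 48 + k := by
  interval_cases k <;> decide

theorem pv_digitChar_roundtrip (c : Char) (h : c.isDigit = true) :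
    Nat.digitChar (c.toNat - '0'.toNat) = c := by
  have hb := pv_digit_bounds c h
  have h0 := pv_zero_toNat
  apply Char.ext
  apply UInt32.toNat_inj.mp
  show (Nat.digitChar (c.toNat - '0'.toNat)).toNat = c.toNat
  rw [pv_digitChar_toNat' _ (by omega)]
  omega

theorem pv_toDigits_all_digit (M : Nat) : ∀ c ∈ Nat.toDigits 10 M, c.isDigit = true := by
  induction M using Nat.strong_induction_on with
  | _ M ih =>
      by_cases hM : M < 10
      · rw [Nat.toDigits_of_lt_base hM]
        intro c hc
        simp at hc
        subst hc
        exact pv_digitChar_isDigit M hM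
      · rw [Nat.toDigits_of_base_le (by norm_num) (by omega)]
        intro c hc
        rcases List.mem_append.mp hc with h | h
        · exact ih (M / 10) (Nat.div_lt_self (by omega) (by norm_num)) c h
        · simp at h; subst h
          exact pv_digitChar_isDigit _ (Nat.mod_lt _ (by norm_num))

theorem pv_toDigits_ne_nil (M : Nat) : Nat.toDigits 10 M ≠ [] := by
  by_cases hM : M < 10
  · rw [Nat.toDigits_of_lt_base hM]; simp
  · rw [Nat.toDigits_of_base_le (by norm_num) (by omega)]; simp

theorem pv_val_toDigits (M : Nat) (a : Nat) :
    pvVal (Nat.toDigits 10 M) a = a * 10 ^ (Nat.toDigits 10 M).length + M := by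
  induction M using Nat.strong_induction_on generalizing a with
  | _ M ih =>
      by_cases hM : M < 10
      · rw [Nat.toDigits_of_lt_base hM, pvVal_cons, pvVal_nil, pv_digitChar_toNat M hM]
        simp
      · rw [Nat.toDigits_of_base_le (by norm_num) (by omega), pvVal_append_singleton,
            ih (M / 10) (Nat.div_lt_self (by omega) (by norm_num)) a,
            pv_digitChar_toNat _ (Nat.mod_lt _ (by norm_num))]
        rw [List.length_append, List.length_singleton]
        have := Nat.div_add_mod M 10
        ring_nf
        omega


theorem pv_join_nil (l : List (List Char)) : PySem.Chars.join [] l = l.flatten := by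
  simp [PySem.Chars.join, List.intercalate]
  induction l with
  | nil => rfl
  | cons x xs ih => cases xs <;> simp_all [List.intersperse]

theorem pv_flatten_singletons {α β : Type} (l : List α) (f : α → β) :
    (l.map (fun x => [f x])).flatten = l.map f := by
  induction l with
  | nil => rfl
  | cons x xs ih => simp [ih]

theorem func6_main (m n : Int) : func6 m n = func6_alt m n := by
  unfold func6 func6_alt
  split_ifs with h1 h2
  · rfl
  · rfl
  · push Not at h1
    push Not at h2
    -- m ≥ 100, n ≥ 1
    have hm0 : (0:Int) < m := h1.1
    have hn0 : (0:Int) < n := h1.2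
    set M : Nat := m.toNat with hMdef
    have hmM : (M : Int) = m := Int.toNat_of_nonneg (by omega)
    have hchars : (PySem.Int.toStr m).toList = Nat.toDigits 10 M := by
      rw [PySem.Int.toList_toStr]
      simp only [PySem.Int.toChars]
      rw [if_neg (by omega)]
    obtain ⟨hd, tl, hds⟩ := List.exists_cons_of_ne_nil (pv_toDigits_ne_nil M)
    have hdig : ∀ c ∈ hd :: tl, c.isDigit = true := by
      rw [← hds]; exact pv_toDigits_all_digit M
    have htl : ∀ c ∈ tl, c.isDigit = true := fun c hc => hdig c (List.mem_cons_of_mem _ hc)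
    -- per-char int(i)
    have htemp : ((hd :: tl).map (fun i => (PySem.Int.ofChars? [i]).getD 0)) =
        (hd :: tl).map (fun c => ((c.toNat - '0'.toNat : Nat) : Int)) := by
      apply List.map_congr_left
      intro c hc
      rw [pv_parse [c] (by simpa using hdig c hc) (by simp)]
      simp [pvVal_cons, pvVal_nil]
    -- the modified leading digit
    set f0 : Nat := hd.toNat - '0'.toNat with hf0def
    set dI : Int := PySem.Int.mod (((f0 : Nat) : Int) + n) 10 with hdIdef
    have hd0 : (0:Int) ≤ dI := PySem.Int.mod_nonneg _ (by norm_num)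
    have hd10 : dI < 10 := PySem.Int.mod_lt _ (by norm_num)
    set k' : Nat := dI.toNat with hk'def
    have hkI : (k' : Int) = dI := Int.toNat_of_nonneg hd0
    have hk10 : k' < 10 := by omega
    -- str() of a single digit
    have hsingle : ∀ e : Int, 0 ≤ e → e < 10 → (PySem.Int.toStr e).toList = [Nat.digitChar e.toNat] := by
      intro e he he10
      rw [PySem.Int.toList_toStr]
      simp only [PySem.Int.toChars]
      rw [if_neg (by omega), Nat.toDigits_of_lt_base (by omega)]
    set P : Nat := 10 ^ tl.length with hPdef
    have hP0 : 0 < P := pow_pos (by norm_num) _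
    set r : Nat := pvVal tl 0 with hrdef
    have hrP : r < P := pvVal_lt tl htl
    have hvds : pvVal (hd :: tl) 0 = M := by
      have h := pv_val_toDigits M 0
      rw [hds] at h
      simpa using h
    have hMsplit : M = f0 * P + r := by
      rw [← hvds, pvVal_cons, pvVal_shift]
      simp [hPdef, hf0def]
      exact hrdef.symm
    have hdiv : M / P = f0 := by
      rw [hMsplit, mul_comm, Nat.mul_add_div hP0, Nat.div_eq_of_lt hrP]
      omega
    have hmapstr : ((dI :: tl.map (fun c => ((c.toNat - '0'.toNat : Nat) : Int))).map PySem.Int.toStr).map String.toList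
        = [Nat.digitChar k'] :: tl.map (fun c => [c]) := by
      simp only [List.map_cons, List.map_map]
      rw [hsingle dI hd0 hd10]
      congr 1
      apply List.map_congr_left
      intro c hc
      have hcd := htl c hc
      have hb := pv_digit_bounds c hcd
      have hz := pv_zero_toNat
      have h9 : ((c.toNat - '0'.toNat : Nat) : Int) < 10 := by push_cast; omega
      show (PySem.Int.toStr ((c.toNat - '0'.toNat : Nat) : Int)).toList = [c]
      rw [hsingle _ (by positivity) h9, Int.toNat_natCast, pv_digitChar_roundtrip c hcd]
    have hflat : (tl.map (fun c => [c])).flatten = tl := by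
      have h := pv_flatten_singletons tl (fun c => c)
      simpa using h
    have hjoin : PySem.Int.ofStr? (PySem.Str.join ""
        ((dI :: tl.map (fun c => ((c.toNat - '0'.toNat : Nat) : Int))).map PySem.Int.toStr))
        = some ((k' * P + r : Nat) : Int) := by
      simp only [PySem.Str.join]
      rw [PySem.Int.ofStr?_ofList]
      have hempty : "".toList = ([] : List Char) := rfl
      rw [hempty, hmapstr, pv_join_nil, List.flatten_cons, hflat, List.singleton_append]
      rw [pv_parse (Nat.digitChar k' :: tl)
        (by
          intro x hx
          rcases List.mem_cons.mp hx with h | h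
          · subst h; exact pv_digitChar_isDigit k' hk10
          · exact htl x h)
        (by simp)]
      rw [pvVal_cons, pv_digitChar_toNat k' hk10]
      rw [show 0 * 10 + k' = k' by omega, pvVal_shift, hPdef]
    have hlen : PySem.Str.len (PySem.Int.toStr m) = ((tl.length + 1 : Nat) : Int) := by
      rw [PySem.Str.len_eq, hchars, hds]; simp
    have hexp : (PySem.Str.len (PySem.Int.toStr m) - 1).toNat = tl.length := by
      rw [hlen]; omega
    have hcastP : ((10:Int) ^ tl.length) = ((P : Nat) : Int) := by
      rw [hPdef]; push_cast; ring
    have hfloor : PySem.Int.floordiv m ((10:Int) ^ tl.length) = ((f0 : Nat) : Int) := by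
      rw [PySem.Int.floordiv_eq_ediv_of_pos (by positivity), ← hmM, hcastP,
        ← Int.natCast_ediv, hdiv]
    -- normalize both sides
    rw [hchars, hds, htemp]
    simp only [List.map_cons]
    rw [PySem.List.pyGetD_zero_cons]
    rw [show ∀ (x : Int) (xs : List Int) (v : Int), PySem.List.pySetD (x :: xs) 0 v = v :: xs by
      intro x xs v
      simp [pysem]]
    rw [← hf0def, ← hdIdef, hjoin]
    simp only [Option.getD_some]
    rw [hexp, hfloor, ← hdIdef, hcastP, ← hkI, ← hmM]

    have hMc : ((M : Nat) : Int) = (f0 : Int) * (P : Int) + (r : Int) := by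
      exact_mod_cast congrArg (Nat.cast : Nat → Int) hMsplit
    push_cast
    refine congrArg some ?_
    rw [hMc]
    ring


-- ===== VERDICT (by name: the statement is the Claim_ definition above) =====
theorem func6_spec : Claim_equal_func6 := by
  intro m n _
  unfold Spec_func6
  exact func6_main m n
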